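-- pv_equiv track=rewrite | github.com/skala-mini-project-ai-agent/agent-markdown | src/agents/base/base_search_agent.py | _source_hints_for_retry
-- ===== SOURCE A (Python) =====
-- from typing import Any
--
-- def _source_hints_for_retry(retry_hints: list[dict[str, Any]]) -> list[str]:
--     hints = ["news", "press_release", "paper"]
--     reasons = {str(hint.get("reason", "")) for hint in retry_hints}
--     if any("conflict" in reason for reason in reasons):
--         hints.extend(["paper", "filing"])
--     if "company_bias" in reasons:
--         hints.extend(["conference", "patent"])
--     if "low_confidence" in reasons:
--         hints.extend(["paper", "conference"])
--     return list(dict.fromkeys(hints))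
-- ===== SOURCE B (Python) =====
-- def _source_hints_for_retry(retry_hints: list[dict[str, object]]) -> list[str]:
--     has_conflict = has_company_bias = has_low_confidence = False
--     for hint in retry_hints:
--         reason = str(hint.get("reason", ""))
--         has_conflict = has_conflict or "conflict" in reason
--         has_company_bias = has_company_bias or reason == "company_bias"
--         has_low_confidence = has_low_confidence or reason == "low_confidence"
--     hints = ["news", "press_release", "paper"]
--     if has_conflict:
--         hints.append("filing")
--     if has_company_bias:
--         hints += ["conference", "patent"]
--     elif has_low_confidence:
--         hints.append("conference")
--     return hints
-- ===== Notes on version B (the rewrite author's own statement) =====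
-- stated objective: simpler
-- what changed: B replaces A's intermediate reasons set, repeated membership scans and final dict.fromkeys dedup pass with a single pass computing three booleans and a direct construction of an already-duplicate-free output (company_bias/low_confidence handled by one if/elif).
import Mathlib
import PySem

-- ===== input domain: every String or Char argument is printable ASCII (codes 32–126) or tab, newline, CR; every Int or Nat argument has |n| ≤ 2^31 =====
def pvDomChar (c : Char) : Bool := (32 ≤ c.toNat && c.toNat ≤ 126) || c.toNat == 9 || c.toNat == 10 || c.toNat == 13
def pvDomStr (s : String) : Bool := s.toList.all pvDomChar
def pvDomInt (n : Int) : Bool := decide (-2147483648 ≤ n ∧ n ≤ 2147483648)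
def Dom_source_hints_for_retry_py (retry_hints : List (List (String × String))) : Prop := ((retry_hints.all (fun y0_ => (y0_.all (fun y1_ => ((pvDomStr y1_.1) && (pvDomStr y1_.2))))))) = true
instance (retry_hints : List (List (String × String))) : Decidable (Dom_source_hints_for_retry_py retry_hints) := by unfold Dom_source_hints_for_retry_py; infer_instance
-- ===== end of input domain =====

-- B replaces A's reasons set + membership scans + dict.fromkeys dedup with one pass computing
-- three booleans and a direct, already-duplicate-free output (objective: simpler).


-- ===== PORT A =====
def source_hints_for_retry_py (retry_hints : List (List (String × String))) : List String :=
  let hints := ["news", "press_release", "paper"]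
  let reasons : PySem.Set String :=
    PySem.Set.ofList (retry_hints.map (fun hint => PySem.Dict.getD (PySem.Dict.mk hint) "reason" ""))
  let hints := if reasons.any (fun reason => PySem.Str.isIn "conflict" reason)
               then hints ++ ["paper", "filing"] else hints
  let hints := if PySem.Set.contains reasons "company_bias"
               then hints ++ ["conference", "patent"] else hints
  let hints := if PySem.Set.contains reasons "low_confidence"
               then hints ++ ["paper", "conference"] else hints
  PySem.List.dedup hints

-- ===== PORT B =====
def source_hints_for_retry_py_alt (retry_hints : List (List (String × String))) : List String :=
  let flags :=
    retry_hints.foldl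
      (fun (f : Bool × Bool × Bool) hint =>
        (f.1 || PySem.Str.isIn "conflict" (PySem.Dict.getD (PySem.Dict.mk hint) "reason" ""),
         f.2.1 || (PySem.Dict.getD (PySem.Dict.mk hint) "reason" "" == "company_bias"),
         f.2.2 || (PySem.Dict.getD (PySem.Dict.mk hint) "reason" "" == "low_confidence")))
      (false, false, false)
  let out := ["news", "press_release", "paper"]
  let out := if flags.1 then out ++ ["filing"] else out
  let out := if flags.2.1 then out ++ ["conference", "patent"]
             else if flags.2.2 then out ++ ["conference"] else out
  out

-- ===== PRECONDITION & SPEC =====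
def Spec_source_hints_for_retry_py (retry_hints : List (List (String × String))) (out : List String) : Prop := out = source_hints_for_retry_py_alt retry_hints
instance (retry_hints : List (List (String × String))) (out : List String) : Decidable (Spec_source_hints_for_retry_py retry_hints out) := by unfold Spec_source_hints_for_retry_py; infer_instance

-- ===== CLAIM (what is proved, stated in full; the proofs are below) =====
def Claim_equal_source_hints_for_retry_py : Prop := ∀ (retry_hints : List (List (String × String))), Dom_source_hints_for_retry_py retry_hints → Spec_source_hints_for_retry_py retry_hints (source_hints_for_retry_py retry_hints)

-- ===== LEMMAS AND PROOFS =====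

-- B's fold computes the three List.any's over the mapped reasons list.
theorem flags_foldl (l : List (List (String × String))) (a b c : Bool) :
    l.foldl
      (fun (f : Bool × Bool × Bool) hint =>
        (f.1 || PySem.Str.isIn "conflict" (PySem.Dict.getD (PySem.Dict.mk hint) "reason" ""),
         f.2.1 || (PySem.Dict.getD (PySem.Dict.mk hint) "reason" "" == "company_bias"),
         f.2.2 || (PySem.Dict.getD (PySem.Dict.mk hint) "reason" "" == "low_confidence")))
      (a, b, c)
    = (a || (l.map (fun hint => PySem.Dict.getD (PySem.Dict.mk hint) "reason" "")).any
          (fun r => PySem.Str.isIn "conflict" r),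
       b || (l.map (fun hint => PySem.Dict.getD (PySem.Dict.mk hint) "reason" "")).any
          (fun r => r == "company_bias"),
       c || (l.map (fun hint => PySem.Dict.getD (PySem.Dict.mk hint) "reason" "")).any
          (fun r => r == "low_confidence")) := by
  induction l generalizing a b c with
  | nil => simp
  | cons h t ih =>
    simp only [List.foldl_cons]
    rw [ih]
    simp [Bool.or_assoc]

-- any over set(xs) equals any over xs (same elements).
theorem any_ofList {α : Type} [DecidableEq α] (xs : List α) (p : α → Bool) :
    (PySem.Set.ofList xs).any p = xs.any p := by
  rcases h : xs.any p with _ | _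
  · rcases h2 : (PySem.Set.ofList xs).any p with _ | _
    · rfl
    · rw [List.any_eq_true] at h2
      obtain ⟨x, hx, hp⟩ := h2
      rw [PySem.Set.mem_ofList] at hx
      rw [List.any_eq_false] at h
      exact absurd hp (by simp [h x hx])
  · rw [List.any_eq_true] at h
    obtain ⟨x, hx, hp⟩ := h
    rw [List.any_eq_true]
    exact ⟨x, (PySem.Set.mem_ofList xs x).2 hx, hp⟩

-- membership in set(xs) as any over xs.
theorem contains_ofList {α : Type} [DecidableEq α] (xs : List α) (y : α) :
    PySem.Set.contains (PySem.Set.ofList xs) y = xs.any (fun x => x == y) := by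
  rcases h : xs.any (fun x => x == y) with _ | _
  · rw [Bool.eq_false_iff]
    intro hc
    rw [PySem.Set.contains_iff, PySem.Set.mem_ofList] at hc
    rw [List.any_eq_false] at h
    have := h y hc
    simp at this
  · rw [List.any_eq_true] at h
    obtain ⟨x, hx, hp⟩ := h
    rw [eq_of_beq hp] at hx
    exact (PySem.Set.contains_iff _ _).2 ((PySem.Set.mem_ofList xs y).2 hx)

-- ===== VERDICT (by name: the statement is the Claim_ definition above) =====
theorem source_hints_for_retry_py_spec : Claim_equal_source_hints_for_retry_py := by
  intro retry_hints _
  show source_hints_for_retry_py retry_hints = source_hints_for_retry_py_alt retry_hints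
  simp only [source_hints_for_retry_py, source_hints_for_retry_py_alt, flags_foldl,
    any_ofList, contains_ofList, Bool.false_or]
  set rs := retry_hints.map (fun hint => PySem.Dict.getD (PySem.Dict.mk hint) "reason" "") with hrs
  generalize rs.any (fun r => PySem.Str.isIn "conflict" r) = c
  generalize rs.any (fun x => x == "company_bias") = cb
  generalize rs.any (fun x => x == "low_confidence") = lc
  cases c <;> cases cb <;> cases lc <;> rfl
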